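-- pv_equiv track=rewrite | github.com/aloginame/SindyThreshold | SindyWindowSearch.py | find_min_three_indices
-- ===== SOURCE A (Python) =====
-- def find_min_three_indices(arr):
--     if len(arr) <= 3:
--         raise ValueError("Input array must have more than three elements")
--
--     # Initialize the minimum three numbers to infinity and their indices to None
--     min1, min2, min3 = float('inf'), float('inf'), float('inf')
--     idx1, idx2, idx3 = None, None, None
--
--     for idx, num in enumerate(arr):
--         if num < min1:
--             min3 = min2
--             idx3 = idx2
--             min2 = min1
--             idx2 = idx1
--             min1 = num
--             idx1 = idx
--         elif num < min2:
--             min3 = min2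
--             idx3 = idx2
--             min2 = num
--             idx2 = idx
--         elif num < min3:
--             min3 = num
--             idx3 = idx
--
--     return idx1, idx2, idx3
-- ===== SOURCE B (Python) =====
-- def find_min_three_indices(arr):
--     if len(arr) <= 3:
--         raise ValueError("Input array must have more than three elements")
--     pairs = sorted(enumerate(arr), key=lambda p: p[1])
--     return pairs[0][0], pairs[1][0], pairs[2][0]
-- ===== Notes on version B (the rewrite author's own statement) =====
-- stated objective: simpler
-- what changed: Replaces the running three-slot selection scan (with its two-level shift logic) by one stable sort of (index, value) pairs followed by taking the first three indices; Python's stable sort reproduces A's first-occurrence tie-breaking.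
import Mathlib
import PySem

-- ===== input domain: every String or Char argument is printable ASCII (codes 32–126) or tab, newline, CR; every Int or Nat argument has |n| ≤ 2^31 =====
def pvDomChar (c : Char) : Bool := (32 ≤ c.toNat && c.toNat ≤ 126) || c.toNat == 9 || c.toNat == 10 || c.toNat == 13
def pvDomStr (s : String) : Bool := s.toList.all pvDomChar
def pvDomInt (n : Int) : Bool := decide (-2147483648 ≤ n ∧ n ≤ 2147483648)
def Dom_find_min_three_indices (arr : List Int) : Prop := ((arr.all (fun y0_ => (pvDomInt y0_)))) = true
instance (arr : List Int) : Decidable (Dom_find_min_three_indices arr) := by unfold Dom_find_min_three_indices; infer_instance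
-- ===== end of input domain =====

-- B replaces A's running three-slot selection scan by a stable sort of (index, value)
-- pairs followed by taking the first three indices (objective: simpler).


-- ===== PORT A =====
-- `none` in a min-slot encodes A's float('inf') initial value: every Int is < inf.
def pvLtInf (num : Int) (m : Option Int) : Bool :=
  match m with
  | none => true
  | some v => num < v

-- loop body of A; state is (min1, idx1, min2, idx2, min3, idx3)
def pvStepA (st : Option Int × Option Int × Option Int × Option Int × Option Int × Option Int)
    (p : Int × Int) : Option Int × Option Int × Option Int × Option Int × Option Int × Option Int :=
  if pvLtInf p.2 st.1 then (some p.2, some p.1, st.1, st.2.1, st.2.2.1, st.2.2.2.1)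
  else if pvLtInf p.2 st.2.2.1 then (st.1, st.2.1, some p.2, some p.1, st.2.2.1, st.2.2.2.1)
  else if pvLtInf p.2 st.2.2.2.2.1 then (st.1, st.2.1, st.2.2.1, st.2.2.2.1, some p.2, some p.1)
  else st

def find_min_three_indices (arr : List Int) : Option Int × Option Int × Option Int :=
  let st := (PySem.List.enumerate arr).foldl pvStepA (none, none, none, none, none, none)
  (st.2.1, st.2.2.2.1, st.2.2.2.2.2)

-- ===== PORT B =====
def find_min_three_indices_alt (arr : List Int) : Option Int × Option Int × Option Int :=
  let pairs := PySem.List.sorted (PySem.List.enumerate arr) (fun p => p.2)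
  ((PySem.List.pyGet? pairs 0).map (·.1), (PySem.List.pyGet? pairs 1).map (·.1),
   (PySem.List.pyGet? pairs 2).map (·.1))

-- ===== PRECONDITION & SPEC =====
-- A raises ValueError when len(arr) <= 3; exactly those inputs are excluded.
def Pre_find_min_three_indices (arr : List Int) : Prop := 3 < arr.length
instance (arr : List Int) : Decidable (Pre_find_min_three_indices arr) := by unfold Pre_find_min_three_indices; infer_instance
def pvWitness_find_min_three_indices : List Int := [5, 1, 4, 2]

def Spec_find_min_three_indices (arr : List Int) (out : Option Int × Option Int × Option Int) : Prop := out = find_min_three_indices_alt arr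
instance (arr : List Int) (out : Option Int × Option Int × Option Int) : Decidable (Spec_find_min_three_indices arr out) := by unfold Spec_find_min_three_indices; infer_instance

-- ===== CLAIM (what is proved, stated in full; the proofs are below) =====
def Claim_equal_find_min_three_indices : Prop := ∀ (arr : List Int), Dom_find_min_three_indices arr → Pre_find_min_three_indices arr → Spec_find_min_three_indices arr (find_min_three_indices arr)

-- ===== LEMMAS AND PROOFS =====

-- the A-state read off from the first three elements of a list of (index, value) pairs
def pvG3 (t : List (Int × Int)) : Option Int × Option Int × Option Int × Option Int × Option Int × Option Int :=
  (t[0]?.map (·.2), t[0]?.map (·.1), t[1]?.map (·.2), t[1]?.map (·.1), t[2]?.map (·.2), t[2]?.map (·.1))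

-- A's loop body is stable insertion (as seen through the first three slots)
theorem pvStepA_g3 (acc : List (Int × Int)) (p : Int × Int) :
    pvStepA (pvG3 acc) p = pvG3 (PySem.List.insertBy (fun a b => decide (a.2 < b.2)) p acc) := by
  match acc with
  | [] => simp [pvStepA, pvLtInf, PySem.List.insertBy, pvG3]
  | [a] =>
    simp only [pvG3, pvStepA, pvLtInf, PySem.List.insertBy]
    split_ifs with h1 h2 <;> simp_all
  | [a, b] =>
    simp only [pvG3, pvStepA, pvLtInf, PySem.List.insertBy]
    split_ifs with h1 h2 h3 <;> simp_all
  | a :: b :: c :: rest =>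
    simp only [pvG3, pvStepA, pvLtInf, PySem.List.insertBy]
    split_ifs with h1 h2 h3 <;> simp_all

theorem pvFold_eq (l acc : List (Int × Int)) :
    l.foldl pvStepA (pvG3 acc) =
      pvG3 (l.foldl (fun a x => PySem.List.insertBy (fun a b => decide ((a.2 : Int) < b.2)) x a) acc) := by
  induction l generalizing acc with
  | nil => rfl
  | cons p l ih => simpa [List.foldl, pvStepA_g3] using ih (PySem.List.insertBy (fun a b => decide (a.2 < b.2)) p acc)

-- ===== VERDICT (by name: the statement is the Claim_ definition above) =====
theorem find_min_three_indices_spec : Claim_equal_find_min_three_indices := by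
  intro arr _ _
  unfold Spec_find_min_three_indices find_min_three_indices find_min_three_indices_alt
  rw [PySem.List.sorted_eq_foldl_insertBy]
  have h := pvFold_eq (PySem.List.enumerate arr) []
  simp only [pvG3, List.getElem?_nil, Option.map_none] at h
  rw [h]
  have h0 := PySem.List.pyGet?_natCast ((PySem.List.enumerate arr).foldl
      (fun a x => PySem.List.insertBy (fun a b => decide ((a.2 : Int) < b.2)) x a) []) 0
  have h1 := PySem.List.pyGet?_natCast ((PySem.List.enumerate arr).foldl
      (fun a x => PySem.List.insertBy (fun a b => decide ((a.2 : Int) < b.2)) x a) []) 1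
  have h2 := PySem.List.pyGet?_natCast ((PySem.List.enumerate arr).foldl
      (fun a x => PySem.List.insertBy (fun a b => decide ((a.2 : Int) < b.2)) x a) []) 2
  simp only [Nat.cast_ofNat, Nat.cast_one, Nat.cast_zero] at h0 h1 h2
  simp [h0, h1, h2]
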